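-- pv_equiv track=rewrite | github.com/itb2/Various-Python-Assignments | Cs101/apt_alliteration/src/Alliteration.py | countall
-- ===== SOURCE A (Python) =====
-- def countall(words):
--     firstletters = []
--     for wrd in words:
--         firstletters.append(wrd[0].lower())      #Putting the first letters in a list
--     previous = firstletters[0]
--     letters = firstletters[1:]   #Setting the list equal to the letters from the second one on
--     count = 1
--     tally = 0
--     for char in letters:
--         if char != previous:
--             if count >1:
--                 tally+=1
--                 count = 1
--                 previous = char
--             else:
--                 previous= char
--         elif char == previous:
--             count += 1
--             previous = char
--     if count >1:
--         tally += 1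
--
--     return tally
-- ===== SOURCE B (Python) =====
-- def countall(words):
--     letters = [w[0].lower() for w in words]
--     eq = [a == b for a, b in zip(letters, letters[1:])]
--     return sum(1 for p, e in zip([False] + eq, eq) if e and not p)
-- ===== Notes on version B (the rewrite author's own statement) =====
-- stated objective: simpler
-- what changed: Replaces A's previous/count/tally state machine (with its trailing flush) by a shift-and-compare pass: build the list of adjacent first-letter equalities and count the positions where an equality starts (true preceded by false/start), i.e. run starts instead of run ends.
-- crash fix: On words == [] A raises IndexError (it reads firstletters[0]); B returns 0. — e.g. on countall([]): A raises IndexError, B returns 0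
import Mathlib
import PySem

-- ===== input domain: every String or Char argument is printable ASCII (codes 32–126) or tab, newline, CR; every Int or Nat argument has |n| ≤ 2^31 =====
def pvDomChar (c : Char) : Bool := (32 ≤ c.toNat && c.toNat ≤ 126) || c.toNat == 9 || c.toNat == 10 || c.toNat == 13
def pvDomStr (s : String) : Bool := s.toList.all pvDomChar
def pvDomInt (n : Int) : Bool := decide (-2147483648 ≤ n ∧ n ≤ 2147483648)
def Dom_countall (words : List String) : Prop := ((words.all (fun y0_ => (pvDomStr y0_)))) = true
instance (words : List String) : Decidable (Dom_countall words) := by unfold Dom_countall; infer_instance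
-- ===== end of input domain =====

-- B replaces A's previous/count/tally state machine by a shift-and-compare pass that
-- counts run STARTS of adjacent equal first letters (objective: simpler; not faster).


-- ===== PORT A =====
-- wrd[0].lower(): exact for nonempty wrd (Pre_ guarantees it); ' ' default is never
-- used inside Pre_ (Python raises IndexError on an empty word, excluded by Pre_).
def pvFirstLower (w : String) : Char :=
  PySem.Chars.lowerChar ((PySem.Str.pyGet? w 0).getD ' ')

def pvAStep (st : Char × Int × Int) (c : Char) : Char × Int × Int :=
  let (previous, count, tally) := st
  if c != previous then
    if count > 1 then (c, 1, tally + 1) else (c, count, tally)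
  else (c, count + 1, tally)

def countall (words : List String) : Int :=
  let firstletters := words.foldl (fun acc w => acc ++ [pvFirstLower w]) []
  match firstletters with
  | [] => 0   -- Python raises IndexError here (firstletters[0]); excluded by Pre_
  | previous :: letters =>
    let s := letters.foldl pvAStep (previous, 1, 0)
    if s.2.1 > 1 then s.2.2 + 1 else s.2.2

-- ===== PORT B =====
def countall_alt (words : List String) : Int :=
  let letters := words.map pvFirstLower
  let eq := (letters.zip letters.tail).map (fun ab => ab.1 == ab.2)
  ((false :: eq).zip eq).foldl (fun t pe => if pe.2 && !pe.1 then t + 1 else t) 0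

-- ===== PRECONDITION & SPEC =====
-- Pre_ excludes exactly the inputs where A raises IndexError: the empty list
-- (firstletters[0]) and any empty-string word (wrd[0]).
def Pre_countall (words : List String) : Prop := words ≠ [] ∧ ∀ w ∈ words, w ≠ ""
instance (words : List String) : Decidable (Pre_countall words) := by unfold Pre_countall; infer_instance
def pvWitness_countall : List String := ["apt", "Ant", "bee", "cat", "cab"]

-- On words == [] A raises IndexError (it reads firstletters[0]); B returns 0.
def Raises_countall (words : List String) : Prop := words = []
instance (words : List String) : Decidable (Raises_countall words) := by unfold Raises_countall; infer_instance
def pvRaiseWitness_countall : List String := []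
def pvRaiseWitnessOut_countall : Int := 0

def Spec_countall (words : List String) (out : Int) : Prop := out = countall_alt words
instance (words : List String) (out : Int) : Decidable (Spec_countall words out) := by unfold Spec_countall; infer_instance

-- ===== CLAIM =====
def Claim_equal_countall : Prop := ∀ (words : List String), Dom_countall words → Pre_countall words → Spec_countall words (countall words)
def Claim_raises_countall : Prop := (∀ (words : List String), Dom_countall words → Raises_countall words → ¬ Pre_countall words) ∧ (Dom_countall (pvRaiseWitness_countall) ∧ Raises_countall (pvRaiseWitness_countall) ∧ countall_alt (pvRaiseWitness_countall) = pvRaiseWitnessOut_countall)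

-- ===== LEMMAS AND PROOFS =====

-- reference run-counter: `inrun` = currently inside a run of length ≥ 2
def pvRuns (prev : Char) (inrun : Bool) : List Char → Int
  | [] => if inrun then 1 else 0
  | c :: rest =>
    if c = prev then pvRuns c true rest
    else (if inrun then 1 else 0) + pvRuns c false rest

theorem pvA_loop_eq (rest : List Char) : ∀ (prev : Char) (count tally : Int), 1 ≤ count →
    (if (rest.foldl pvAStep (prev, count, tally)).2.1 > 1
       then (rest.foldl pvAStep (prev, count, tally)).2.2 + 1
       else (rest.foldl pvAStep (prev, count, tally)).2.2)
      = tally + pvRuns prev (decide (count > 1)) rest := by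
  induction rest with
  | nil =>
    intro prev count tally _
    simp only [List.foldl_nil, pvRuns]
    split_ifs <;> simp_all <;> omega
  | cons c rest ih =>
    intro prev count tally hc
    by_cases hne : c = prev
    · have hstep : pvAStep (prev, count, tally) c = (prev, count + 1, tally) := by
        simp [pvAStep, hne]
      rw [List.foldl_cons, hstep, ih prev (count + 1) tally (by omega)]
      have h1 : decide (count + 1 > 1) = true := by simp; omega
      rw [h1]
      simp [pvRuns, hne]
    · have hstep : pvAStep (prev, count, tally) c
          = if count > 1 then (c, 1, tally + 1) else (c, count, tally) := by
        simp [pvAStep, hne]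
      rw [List.foldl_cons, hstep]
      by_cases hgt : count > 1
      · rw [if_pos hgt, ih c 1 (tally + 1) le_rfl]
        simp [pvRuns, hne, hgt]
        ring
      · rw [if_neg hgt, ih c count tally hc]
        have h1 : decide (count > 1) = false := by simp; omega
        rw [h1]
        simp [pvRuns, hne]

-- B's fold with a shifted flag equals the reference counter plus the pending-run credit
theorem pvB_loop_eq (rest : List Char) : ∀ (prev : Char) (pflag : Bool) (t : Int),
    (((pflag :: ((prev :: rest).zip rest).map (fun ab => ab.1 == ab.2)).zip
        (((prev :: rest).zip rest).map (fun ab => ab.1 == ab.2))).foldl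
        (fun t pe => if pe.2 && !pe.1 then t + 1 else t) t)
      + (if pflag then (1 : Int) else 0) = t + pvRuns prev pflag rest := by
  induction rest with
  | nil => intro prev pflag t; cases pflag <;> simp [pvRuns]
  | cons c rest ih =>
    intro prev pflag t
    simp only [List.zip_cons_cons, List.map_cons, List.foldl_cons]
    have key := ih c (prev == c) (if ((prev == c) && !pflag) = true then t + 1 else t)
    by_cases hne : c = prev
    · have hpc : (prev == c) = true := by simp [hne]
      cases pflag <;> simp [pvRuns, hne] at key ⊢ <;> linarith [key]
    · have hpc : (prev == c) = false := by simp; exact fun h => hne h.symm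
      cases pflag <;> simp [pvRuns, hne, hpc] at key ⊢ <;> linarith [key]

theorem pv_build_letters (l : List String) : ∀ acc : List Char,
    l.foldl (fun acc w => acc ++ [pvFirstLower w]) acc = acc ++ l.map pvFirstLower := by
  induction l with
  | nil => simp
  | cons w l ih => intro acc; simp [ih]

theorem countall_spec : Claim_equal_countall := by
  intro words _ hpre
  unfold Spec_countall countall countall_alt
  obtain ⟨hne, -⟩ := hpre
  rw [pv_build_letters]
  cases words with
  | nil => exact absurd rfl hne
  | cons w ws =>
    simp only [List.nil_append, List.map_cons, List.tail_cons]
    have hA := pvA_loop_eq (ws.map pvFirstLower) (pvFirstLower w) 1 0 le_rfl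
    have hB := pvB_loop_eq (ws.map pvFirstLower) (pvFirstLower w) false 0
    simp only [if_neg (by decide : ¬ (false = true)), add_zero] at hB
    rw [show (decide ((1:Int) > 1)) = false from by decide] at hA
    linarith [hA, hB]

@[simp] theorem countall_raises : Claim_raises_countall := by
  unfold Claim_raises_countall
  exact ⟨by intro words _ hr ⟨hne, _⟩; exact hne hr, by decide⟩
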